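-- pv_equiv track=rewrite | github.com/ndb77/pdf-to-db | entity_processor1.py | _entities_appear_close
-- ===== SOURCE A (Python) =====
-- def _entities_appear_close(entity1: str, entity2: str, text: str,
--                          window_size: int = 100) -> bool:
--     """Check if two entities appear within a certain character window of each other."""
--     try:
--         text_lower = text.lower()
--         entity1_lower = entity1.lower()
--         entity2_lower = entity2.lower()
--
--         # Find all positions of both entities
--         positions1 = [i for i in range(len(text_lower)) if text_lower[i:].startswith(entity1_lower)]
--         positions2 = [i for i in range(len(text_lower)) if text_lower[i:].startswith(entity2_lower)]
--
--         # Check if any positions are within the window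
--         for pos1 in positions1:
--             for pos2 in positions2:
--                 if abs(pos1 - pos2) <= window_size:
--                     return True
--
--         return False
--
--     except Exception:
--         return False
-- ===== SOURCE B (Python) =====
-- def _entities_appear_close(entity1: str, entity2: str, text: str,
--                            window_size: int = 100) -> bool:
--     """Single left-to-right sweep: remember the latest occurrence of each
--     entity seen so far and compare each new occurrence against the other's
--     latest position, instead of materialising both position lists and
--     comparing every pair."""
--     t = text.lower()
--     e1 = entity1.lower()
--     e2 = entity2.lower()
--     last1 = None
--     last2 = None
--     for i in range(len(t)):
--         m1 = t.startswith(e1, i)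
--         m2 = t.startswith(e2, i)
--         if m1:
--             last1 = i
--         if m2:
--             last2 = i
--         if m1 and last2 is not None and i - last2 <= window_size:
--             return True
--         if m2 and last1 is not None and i - last1 <= window_size:
--             return True
--     return False
-- ===== Notes on version B (the rewrite author's own statement) =====
-- stated objective: faster
-- what changed: Replaced the two position-list comprehensions (each slicing text[i:]) plus the quadratic all-pairs window check with a single left-to-right sweep that keeps the latest occurrence of each entity and compares each new occurrence against the other's latest position.
import Mathlib
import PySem

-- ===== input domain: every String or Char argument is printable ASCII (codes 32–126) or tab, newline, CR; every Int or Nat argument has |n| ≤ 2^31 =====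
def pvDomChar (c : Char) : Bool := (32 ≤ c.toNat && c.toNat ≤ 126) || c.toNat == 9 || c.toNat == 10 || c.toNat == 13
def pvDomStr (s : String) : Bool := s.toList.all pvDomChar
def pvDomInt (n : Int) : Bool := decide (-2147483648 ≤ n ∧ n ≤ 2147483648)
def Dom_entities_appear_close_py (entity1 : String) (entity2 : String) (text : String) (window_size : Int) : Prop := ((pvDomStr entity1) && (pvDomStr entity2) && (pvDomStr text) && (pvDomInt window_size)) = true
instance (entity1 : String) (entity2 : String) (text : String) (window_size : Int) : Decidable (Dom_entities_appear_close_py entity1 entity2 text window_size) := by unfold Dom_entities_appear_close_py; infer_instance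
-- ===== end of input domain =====

-- B replaces A's two position-list comprehensions and quadratic all-pairs window test by a
-- single sweep that tracks the latest occurrence of each entity (faster; measured by the check).

-- ===== PORT A =====
-- A's try/except is dead code: no statement in the body can raise, so it is not ported.
def entities_appear_close_py (entity1 : String) (entity2 : String) (text : String) (window_size : Int) : Bool :=
  let text_lower := PySem.Str.lower text
  let entity1_lower := PySem.Str.lower entity1
  let entity2_lower := PySem.Str.lower entity2
  let positions1 := (PySem.List.pyRange 0 (PySem.Str.len text_lower)).filter
      (fun i => PySem.Str.startswith (PySem.Str.slice text_lower (some i) none) entity1_lower)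
  let positions2 := (PySem.List.pyRange 0 (PySem.Str.len text_lower)).filter
      (fun i => PySem.Str.startswith (PySem.Str.slice text_lower (some i) none) entity2_lower)
  positions1.any (fun pos1 => positions2.any (fun pos2 => decide (|pos1 - pos2| ≤ window_size)))

-- ===== PORT B =====
-- 'last is not None and i - last <= window_size' of Source B
def pvNear (i : Int) (last : Option Int) (w : Int) : Bool :=
  match last with
  | some j => decide (i - j ≤ w)
  | none => false

-- the 'for i in range(len(t))' loop of Source B, with its two 'last seen' registers
def pvSweep (m1f m2f : Int → Bool) (w : Int) : List Int → Option Int → Option Int → Bool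
  | [], _, _ => false
  | i :: rest, last1, last2 =>
    let m1 := m1f i
    let m2 := m2f i
    let last1' := if m1 then some i else last1
    let last2' := if m2 then some i else last2
    if m1 && pvNear i last2' w then true
    else if m2 && pvNear i last1' w then true
    else pvSweep m1f m2f w rest last1' last2'

def entities_appear_close_py_alt (entity1 : String) (entity2 : String) (text : String) (window_size : Int) : Bool :=
  let t := PySem.Str.lower text
  let e1 := PySem.Str.lower entity1
  let e2 := PySem.Str.lower entity2
  -- t.startswith(e, i) with 0 ≤ i ≤ len(t) is exactly t[i:].startswith(e)
  pvSweep (fun i => PySem.Str.startswith (PySem.Str.slice t (some i) none) e1)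
          (fun i => PySem.Str.startswith (PySem.Str.slice t (some i) none) e2)
          window_size (PySem.List.pyRange 0 (PySem.Str.len t)) none none

-- ===== PRECONDITION & SPEC =====
def Spec_entities_appear_close_py (entity1 : String) (entity2 : String) (text : String) (window_size : Int) (out : Bool) : Prop := out = entities_appear_close_py_alt entity1 entity2 text window_size
instance (entity1 : String) (entity2 : String) (text : String) (window_size : Int) (out : Bool) : Decidable (Spec_entities_appear_close_py entity1 entity2 text window_size out) := by unfold Spec_entities_appear_close_py; infer_instance

-- ===== CLAIM (what is proved, stated in full; the proofs are below) =====
def Claim_equal_entities_appear_close_py : Prop := ∀ (entity1 : String) (entity2 : String) (text : String) (window_size : Int), Dom_entities_appear_close_py entity1 entity2 text window_size → Spec_entities_appear_close_py entity1 entity2 text window_size (entities_appear_close_py entity1 entity2 text window_size)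

-- ===== LEMMAS AND PROOFS =====

-- "some pair of matches, the later one at p, lies within the window"
def pvPhi (p1f p2f : Int → Bool) (w p : Int) : Prop :=
  (p1f p = true ∧ ∃ q, 0 ≤ q ∧ q ≤ p ∧ p2f q = true ∧ p - q ≤ w) ∨
  (p2f p = true ∧ ∃ q, 0 ≤ q ∧ q ≤ p ∧ p1f q = true ∧ p - q ≤ w)

lemma pvSweep_iff (p1f p2f : Int → Bool) (w n : Int) :
    ∀ (k : Nat) (a1 a2 : Option Int), 0 ≤ n - (k : Int) →
    (∀ j, a1 = some j → p1f j = true ∧ 0 ≤ j ∧ j < n - (k : Int)) →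
    (∀ j, a2 = some j → p2f j = true ∧ 0 ≤ j ∧ j < n - (k : Int)) →
    (∀ p, 0 ≤ p → p < n - (k : Int) → p1f p = true → ∃ j, a1 = some j ∧ p ≤ j) →
    (∀ p, 0 ≤ p → p < n - (k : Int) → p2f p = true → ∃ j, a2 = some j ∧ p ≤ j) →
    (pvSweep p1f p2f w (PySem.List.pyRange (n - (k : Int)) n) a1 a2 = true ↔
      ∃ p, n - (k : Int) ≤ p ∧ p < n ∧ pvPhi p1f p2f w p) := by
  intro k
  induction k with
  | zero =>
    intro a1 a2 _ _ _ _ _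
    rw [PySem.List.pyRange_one_eq_nil (by omega)]
    simp only [pvSweep]
    constructor
    · intro h; exact absurd h (by simp)
    · rintro ⟨p, hp1, hp2, _⟩; omega
  | succ k ih =>
    intro a1 a2 hn h1 h2 d1 d2
    have hklt : n - ((k : Int) + 1) < n := by omega
    have hcast : (((k : Nat) + 1 : Nat) : Int) = (k : Int) + 1 := by push_cast; ring
    rw [hcast] at hn h1 h2 d1 d2 ⊢
    set i : Int := n - ((k : Int) + 1) with hi
    have hi0 : 0 ≤ i := hn
    rw [PySem.List.pyRange_one_cons hklt]
    simp only [pvSweep]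
    set a1' : Option Int := if p1f i = true then some i else a1 with ha1'
    set a2' : Option Int := if p2f i = true then some i else a2 with ha2'
    have hit1 : (p1f i && pvNear i a2' w) = true ↔
        (p1f i = true ∧ ∃ q, 0 ≤ q ∧ q ≤ i ∧ p2f q = true ∧ i - q ≤ w) := by
      simp only [Bool.and_eq_true]
      constructor
      · rintro ⟨hm1, hnear⟩
        refine ⟨hm1, ?_⟩
        by_cases hm2 : p2f i = true
        · rw [ha2', if_pos hm2] at hnear
          simp only [pvNear, decide_eq_true_eq] at hnear
          exact ⟨i, hi0, le_refl i, hm2, hnear⟩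
        · rw [ha2', if_neg hm2] at hnear
          rcases a2 with _ | j
          · simp [pvNear] at hnear
          · simp only [pvNear, decide_eq_true_eq] at hnear
            obtain ⟨hj2, hj0, hji⟩ := h2 j rfl
            exact ⟨j, hj0, by omega, hj2, hnear⟩
      · rintro ⟨hm1, q, hq0, hqi, hq2, hqw⟩
        refine ⟨hm1, ?_⟩
        by_cases hm2 : p2f i = true
        · rw [ha2', if_pos hm2]; simp only [pvNear, decide_eq_true_eq]; omega
        · have hqlt : q < i := by
            rcases eq_or_lt_of_le hqi with h | h
            · exact absurd (h ▸ hq2) (by simpa using hm2)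
            · exact h
          obtain ⟨j, hj, hqj⟩ := d2 q hq0 (by omega) hq2
          obtain ⟨_, _, hji⟩ := h2 j hj
          rw [ha2', if_neg hm2, hj]; simp only [pvNear, decide_eq_true_eq]
          omega
    have hit2 : (p2f i && pvNear i a1' w) = true ↔
        (p2f i = true ∧ ∃ q, 0 ≤ q ∧ q ≤ i ∧ p1f q = true ∧ i - q ≤ w) := by
      simp only [Bool.and_eq_true]
      constructor
      · rintro ⟨hm2, hnear⟩
        refine ⟨hm2, ?_⟩
        by_cases hm1 : p1f i = true
        · rw [ha1', if_pos hm1] at hnear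
          simp only [pvNear, decide_eq_true_eq] at hnear
          exact ⟨i, hi0, le_refl i, hm1, hnear⟩
        · rw [ha1', if_neg hm1] at hnear
          rcases a1 with _ | j
          · simp [pvNear] at hnear
          · simp only [pvNear, decide_eq_true_eq] at hnear
            obtain ⟨hj1, hj0, hji⟩ := h1 j rfl
            exact ⟨j, hj0, by omega, hj1, hnear⟩
      · rintro ⟨hm2, q, hq0, hqi, hq1, hqw⟩
        refine ⟨hm2, ?_⟩
        by_cases hm1 : p1f i = true
        · rw [ha1', if_pos hm1]; simp only [pvNear, decide_eq_true_eq]; omega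
        · have hqlt : q < i := by
            rcases eq_or_lt_of_le hqi with h | h
            · exact absurd (h ▸ hq1) (by simpa using hm1)
            · exact h
          obtain ⟨j, hj, hqj⟩ := d1 q hq0 (by omega) hq1
          obtain ⟨_, _, hji⟩ := h1 j hj
          rw [ha1', if_neg hm1, hj]; simp only [pvNear, decide_eq_true_eq]
          omega
    have hrest : pvSweep p1f p2f w (PySem.List.pyRange (i + 1) n) a1' a2' = true ↔
        ∃ p, i + 1 ≤ p ∧ p < n ∧ pvPhi p1f p2f w p := by
      have hieq : n - (k : Int) = i + 1 := by omega
      have := ih a1' a2' (by omega)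
        (by
          intro j hj
          by_cases hm1 : p1f i = true
          · rw [ha1', if_pos hm1] at hj
            rw [Option.some.injEq] at hj
            subst hj; exact ⟨hm1, hi0, by omega⟩
          · rw [ha1', if_neg hm1] at hj
            obtain ⟨h, h0, hlt⟩ := h1 j hj; exact ⟨h, h0, by omega⟩)
        (by
          intro j hj
          by_cases hm2 : p2f i = true
          · rw [ha2', if_pos hm2] at hj
            rw [Option.some.injEq] at hj
            subst hj; exact ⟨hm2, hi0, by omega⟩
          · rw [ha2', if_neg hm2] at hj
            obtain ⟨h, h0, hlt⟩ := h2 j hj; exact ⟨h, h0, by omega⟩)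
        (by
          intro p hp0 hplt hp
          by_cases hm1 : p1f i = true
          · exact ⟨i, by rw [ha1', if_pos hm1], by omega⟩
          · have hpi : p < i := by
              rcases eq_or_lt_of_le (show p ≤ i by omega) with h | h
              · exact absurd (h ▸ hp) (by simpa using hm1)
              · exact h
            obtain ⟨j, hj, hpj⟩ := d1 p hp0 (by omega) hp
            exact ⟨j, by rw [ha1', if_neg hm1]; exact hj, hpj⟩)
        (by
          intro p hp0 hplt hp
          by_cases hm2 : p2f i = true
          · exact ⟨i, by rw [ha2', if_pos hm2], by omega⟩
          · have hpi : p < i := by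
              rcases eq_or_lt_of_le (show p ≤ i by omega) with h | h
              · exact absurd (h ▸ hp) (by simpa using hm2)
              · exact h
            obtain ⟨j, hj, hpj⟩ := d2 p hp0 (by omega) hp
            exact ⟨j, by rw [ha2', if_neg hm2]; exact hj, hpj⟩)
      rw [hieq] at this
      exact this
    by_cases hc1 : (p1f i && pvNear i a2' w) = true
    · rw [if_pos hc1]
      exact iff_of_true rfl ⟨i, le_refl i, hklt, Or.inl (hit1.mp hc1)⟩
    · rw [if_neg hc1]
      by_cases hc2 : (p2f i && pvNear i a1' w) = true
      · rw [if_pos hc2]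
        exact iff_of_true rfl ⟨i, le_refl i, hklt, Or.inr (hit2.mp hc2)⟩
      · rw [if_neg hc2]
        rw [hrest]
        constructor
        · rintro ⟨p, hp1, hp2, hphi⟩; exact ⟨p, by omega, hp2, hphi⟩
        · rintro ⟨p, hp1, hp2, hphi⟩
          rcases eq_or_lt_of_le hp1 with h | h
          · exfalso
            rcases hphi with hphi | hphi
            · exact hc1 (hit1.mpr (h ▸ hphi))
            · exact hc2 (hit2.mpr (h ▸ hphi))
          · exact ⟨p, by omega, hp2, hphi⟩

lemma pvPairs_iff_phi (p1f p2f : Int → Bool) (w n : Int) :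
    (∃ p, (0 ≤ p ∧ p < n) ∧ p1f p = true ∧
       ∃ q, (0 ≤ q ∧ q < n) ∧ p2f q = true ∧ |p - q| ≤ w) ↔
    (∃ p, 0 ≤ p ∧ p < n ∧ pvPhi p1f p2f w p) := by
  constructor
  · rintro ⟨p, ⟨hp0, hpn⟩, hp1, q, ⟨hq0, hqn⟩, hq2, hw⟩
    obtain ⟨hw1, hw2⟩ := abs_le.mp hw
    rcases le_total q p with h | h
    · exact ⟨p, hp0, hpn, Or.inl ⟨hp1, q, hq0, h, hq2, by omega⟩⟩
    · exact ⟨q, hq0, hqn, Or.inr ⟨hq2, p, hp0, h, hp1, by omega⟩⟩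
  · rintro ⟨p, hp0, hpn, hphi | hphi⟩
    · obtain ⟨hp1, q, hq0, hqp, hq2, hw⟩ := hphi
      exact ⟨p, ⟨hp0, hpn⟩, hp1, q, ⟨hq0, by omega⟩, hq2, by rw [abs_le]; omega⟩
    · obtain ⟨hp2, q, hq0, hqp, hq1, hw⟩ := hphi
      exact ⟨q, ⟨hq0, by omega⟩, hq1, p, ⟨hp0, hpn⟩, hp2, by rw [abs_le]; omega⟩

-- ===== VERDICT (by name: the statement is the Claim_ definition above) =====
theorem entities_appear_close_py_spec : Claim_equal_entities_appear_close_py := by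
  intro entity1 entity2 text window_size _hdom
  unfold Spec_entities_appear_close_py
  unfold entities_appear_close_py entities_appear_close_py_alt
  rw [Bool.eq_iff_iff]
  set t := PySem.Str.lower text
  set e1 := PySem.Str.lower entity1
  set e2 := PySem.Str.lower entity2
  set n := PySem.Str.len t with hn
  set p1f : Int → Bool := fun i => PySem.Str.startswith (PySem.Str.slice t (some i) none) e1
  set p2f : Int → Bool := fun i => PySem.Str.startswith (PySem.Str.slice t (some i) none) e2
  have hn0 : 0 ≤ n := by
    rw [hn, PySem.Str.len_eq]
    exact Int.natCast_nonneg _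
  have hA : ((PySem.List.pyRange 0 n).filter p1f).any
      (fun pos1 => ((PySem.List.pyRange 0 n).filter p2f).any
        (fun pos2 => decide (|pos1 - pos2| ≤ window_size))) = true ↔
      ∃ p, (0 ≤ p ∧ p < n) ∧ p1f p = true ∧
        ∃ q, (0 ≤ q ∧ q < n) ∧ p2f q = true ∧ |p - q| ≤ window_size := by
    simp only [List.any_eq_true, List.mem_filter, PySem.List.mem_pyRange_one,
      decide_eq_true_eq]
    constructor
    · rintro ⟨p, ⟨hp, hp1⟩, q, ⟨hq, hq2⟩, hw⟩
      exact ⟨p, hp, hp1, q, hq, hq2, hw⟩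
    · rintro ⟨p, hp, hp1, q, hq, hq2, hw⟩
      exact ⟨p, ⟨hp, hp1⟩, q, ⟨hq, hq2⟩, hw⟩
  have h0 : n - ((n.toNat : Nat) : Int) = 0 := by omega
  have hB := pvSweep_iff p1f p2f window_size n n.toNat (none) (none)
    (by omega) (by intro j hj; cases hj) (by intro j hj; cases hj)
    (by intro p _ hp _; omega) (by intro p _ hp _; omega)
  rw [h0] at hB
  rw [hA, hB, pvPairs_iff_phi]
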